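-- pv_equiv track=rewrite | github.com/stineje/CharLib | charlib/characterizer/LogicParser.py | _resolve_unates
-- ===== SOURCE A (Python) =====
-- def _resolve_unates(syntax_tree: list, target: str):
--     """Determine the 'unateness' of the function with respect to the target input."""
--     op = syntax_tree.pop(0)
--     if op == '~':
--         unate_l = -1
--         unate_r = None
--     elif op == '&':
--         unate_l = 1
--         unate_r = 1
--     elif str(op) in ['|', '^', '~^', '^~']:
--         # can't determine these yet - have to check which side contains the target
--         unate_l = 0
--         unate_r = 0
--     else:
--         return syntax_tree, {op: 1} # Return symbol
--     # Resolve left side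
--     syntax_tree, unates = _resolve_unates(syntax_tree, target)
--     # Check for target in left side
--     if unate_l == 0 and target in unates:
--         unate_l = 1
--     else:
--         unate_l = -1
--     for k,u in unates.items():
--         unates[k] = unate_l * u
--     # Resolve right side
--     if unate_r is not None:
--         syntax_tree, unates_r = _resolve_unates(syntax_tree, target)
--         # Check for target in right side
--         if unate_r == 0 and target in unates_r:
--             unate_r = 1
--         else:
--             unate_r = -1
--         for k,u in unates_r.items():
--             unates[k] = unate_r * u
--     return syntax_tree, unates
-- ===== SOURCE B (Python) =====
-- def _resolve_unates(syntax_tree: list, target: str):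
--     """Iterative work-stack version: same pops from the same list, same sign rules,
--     same left-then-right dict overwrite."""
--     CHECKED = ('|', '^', '~^', '^~')
--     frames = []          # ('~', None) | (binop, None) while left pending | (binop, left_dict)
--     result = None
--     while True:
--         if result is None:
--             tok = syntax_tree.pop(0)
--             if tok == '~' or tok == '&' or tok in CHECKED:
--                 frames.append((tok, None))
--             else:
--                 result = {tok: 1}
--         else:
--             if not frames:
--                 return syntax_tree, result
--             op, left = frames.pop()
--             if op == '~':
--                 result = {k: -u for k, u in result.items()}
--             else:
--                 sign = 1 if (op in CHECKED and target in result) else -1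
--                 if left is None:
--                     frames.append((op, {k: sign * u for k, u in result.items()}))
--                     result = None
--                 else:
--                     for k, u in result.items():
--                         left[k] = sign * u
--                     result = left
-- ===== Notes on version B (the rewrite author's own statement) =====
-- stated objective: alternative
-- what changed: Replaces A's double self-recursion with an explicit work-stack loop (operator frames holding a pending or resolved left dict), computing each multiplier directly as a single sign test instead of A's unate_l/unate_r variable threading; same pops, same sign results, same left-then-right dict overwrite.
import Mathlib
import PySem

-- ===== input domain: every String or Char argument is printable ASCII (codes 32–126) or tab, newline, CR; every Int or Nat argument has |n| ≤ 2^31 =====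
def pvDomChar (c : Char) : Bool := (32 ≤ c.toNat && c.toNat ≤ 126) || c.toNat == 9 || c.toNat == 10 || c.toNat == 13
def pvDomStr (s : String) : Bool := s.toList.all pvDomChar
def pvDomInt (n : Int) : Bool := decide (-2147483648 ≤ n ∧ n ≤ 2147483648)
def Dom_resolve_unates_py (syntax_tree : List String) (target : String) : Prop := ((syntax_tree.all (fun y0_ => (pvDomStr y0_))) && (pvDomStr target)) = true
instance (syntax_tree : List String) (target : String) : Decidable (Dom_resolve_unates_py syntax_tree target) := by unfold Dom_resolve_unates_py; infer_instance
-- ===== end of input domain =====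

-- B replaces A's double recursion by an explicit work-stack loop (same pops, same sign
-- rules, same left-then-right dict overwrite); equivalence of RETURN values is proved —
-- both versions mutate (fully pop) the argument list identically in Python.

-- ===== PORT A =====
-- Literal port of the recursive A; fuel (syntax_tree.length + 1 at top level) is a totality
-- guard only: Python raises IndexError exactly where the port yields none.
def pyResolveA : Nat → List String → String → Option (List String × PySem.Dict String Int)
  | 0, _, _ => none
  | fuel+1, syntax_tree, target =>
    match syntax_tree with
    | [] => none  -- syntax_tree.pop(0) raises IndexError
    | op :: rest =>
      -- shared code after the if/elif chain, parameterised by unate_l / unate_r as in A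
      let cont : Int → Option Int → Option (List String × PySem.Dict String Int) :=
        fun unate_l0 unate_r0 =>
          match pyResolveA fuel rest target with
          | none => none
          | some (st1, unates0) =>
            let unate_l : Int := if unate_l0 = 0 ∧ unates0.contains target then 1 else -1
            let unates := unates0.items.foldl (fun d kv => d.insert kv.1 (unate_l * kv.2)) unates0
            match unate_r0 with
            | none => some (st1, unates)
            | some ur0 =>
              match pyResolveA fuel st1 target with
              | none => none
              | some (st2, unates_r) =>
                let unate_r : Int := if ur0 = 0 ∧ unates_r.contains target then 1 else -1
                some (st2, unates_r.items.foldl (fun d kv => d.insert kv.1 (unate_r * kv.2)) unates)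
      if op = "~" then cont (-1) none
      else if op = "&" then cont 1 (some 1)
      else if op ∈ (["|", "^", "~^", "^~"] : List String) then cont 0 (some 0)
      else some (rest, PySem.Dict.ofList [(op, 1)])

def resolve_unates_py (syntax_tree : List String) (target : String) : List String × (List (String × Int)) :=
  match pyResolveA (syntax_tree.length + 1) syntax_tree target with
  | some (st, d) => (st, d.items)
  | none => ([], [])  -- unreachable under Pre_ (the Python raises IndexError there)

-- ===== PORT B =====
def pvFrameWeight (frames : List (String × Option (PySem.Dict String Int))) : Nat :=
  (frames.map (fun fr => if fr.2.isSome then 1 else 2)).sum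

-- Literal port of B's while-loop (terminating by (tokens left, pending frame weight)).
def loopB (syntax_tree : List String) (frames : List (String × Option (PySem.Dict String Int)))
    (result : Option (PySem.Dict String Int)) (target : String) :
    Option (List String × PySem.Dict String Int) :=
  match result with
  | none =>
    match syntax_tree with
    | [] => none  -- syntax_tree.pop(0) raises IndexError
    | tok :: rest =>
      if tok = "~" ∨ tok = "&" ∨ tok ∈ (["|", "^", "~^", "^~"] : List String) then
        loopB rest ((tok, none) :: frames) none target
      else
        loopB rest frames (some (PySem.Dict.ofList [(tok, 1)])) target
  | some res =>
    match frames with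
    | [] => some (syntax_tree, res)
    | (op, left?) :: frames' =>
      if op = "~" then
        loopB syntax_tree frames' (some (PySem.Dict.mk (res.items.map (fun kv => (kv.1, -kv.2))))) target
      else
        let sign : Int := if op ∈ (["|", "^", "~^", "^~"] : List String) ∧ res.contains target then 1 else -1
        match left? with
        | none =>
          loopB syntax_tree ((op, some (PySem.Dict.mk (res.items.map (fun kv => (kv.1, sign * kv.2))))) :: frames') none target
        | some left =>
          loopB syntax_tree frames' (some (res.items.foldl (fun d kv => d.insert kv.1 (sign * kv.2)) left)) target
  termination_by (syntax_tree.length, pvFrameWeight frames)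
  decreasing_by
  all_goals simp [Prod.lex_iff, pvFrameWeight]
  all_goals split <;> omega

def resolve_unates_py_alt (syntax_tree : List String) (target : String) : List String × (List (String × Int)) :=
  match loopB syntax_tree [] none target with
  | some (st, d) => (st, d.items)
  | none => ([], [])  -- unreachable under Pre_ (the Python raises IndexError there)

-- ===== PRECONDITION & SPEC =====
-- Token weight for the Polish-prefix balance condition: binary operators +1, '~' 0, symbols -1.
def pvWt (s : String) : Int :=
  if s = "~" then 0
  else if s = "&" ∨ s = "|" ∨ s = "^" ∨ s = "~^" ∨ s = "^~" then 1
  else -1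

-- A (and B) raise IndexError iff no prefix of syntax_tree is a complete prefix-notation
-- expression; that balance condition is the precondition.
def Pre_resolve_unates_py (syntax_tree : List String) (target : String) : Prop :=
  ∃ j < syntax_tree.length + 1, 1 + ((syntax_tree.take j).map pvWt).sum = 0
instance (syntax_tree : List String) (target : String) : Decidable (Pre_resolve_unates_py syntax_tree target) := by unfold Pre_resolve_unates_py; infer_instance

def pvWitness_resolve_unates_py : List String × String := (["&", "a", "b"], "a")

def Spec_resolve_unates_py (syntax_tree : List String) (target : String) (out : List String × (List (String × Int))) : Prop := out = resolve_unates_py_alt syntax_tree target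
instance (syntax_tree : List String) (target : String) (out : List String × (List (String × Int))) : Decidable (Spec_resolve_unates_py syntax_tree target out) := by unfold Spec_resolve_unates_py; infer_instance

-- ===== CLAIM (what is proved, stated in full; the proofs are below) =====
def Claim_equal_resolve_unates_py : Prop := ∀ (syntax_tree : List String) (target : String), Dom_resolve_unates_py syntax_tree target → Pre_resolve_unates_py syntax_tree target → Spec_resolve_unates_py syntax_tree target (resolve_unates_py syntax_tree target)

-- ===== LEMMAS AND PROOFS =====

def pvSum (l : List String) : Int := (l.map pvWt).sum

theorem pvSum_cons (s : String) (l : List String) : pvSum (s :: l) = pvWt s + pvSum l := by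
  simp [pvSum]

theorem pvSum_take_add (l : List String) (m n : Nat) :
    pvSum (l.take (m + n)) = pvSum (l.take m) + pvSum ((l.drop m).take n) := by
  rw [List.take_add, pvSum, List.map_append, List.sum_append]; rfl

theorem pvMkItems (d : PySem.Dict String Int) : PySem.Dict.mk d.items = d := by
  cases d; rfl

theorem pvMapId (k : String) (v : Int) : ∀ (l : List (String × Int)), k ∉ l.map Prod.fst →
    l.map (fun p => if (p.1 == k) = true then (k, v) else p) = l := by
  intro l hl
  induction l with
  | nil => rfl
  | cons p l ih =>
    simp only [List.map_cons, List.mem_cons, not_or] at hl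
    obtain ⟨h1, h2⟩ := hl
    rw [List.map_cons, if_neg (by simp only [beq_iff_eq]; exact fun hh => h1 hh.symm), ih h2]

-- inserting an existing key overwrites it in place
theorem pvInsertMid (pre suf : List (String × Int)) (k : String) (v w : Int)
    (h : ((pre ++ (k, w) :: suf).map Prod.fst).Nodup) :
    (PySem.Dict.mk (pre ++ (k, w) :: suf)).insert k v = PySem.Dict.mk (pre ++ (k, v) :: suf) := by
  have h' := h
  simp only [List.map_append, List.map_cons, List.nodup_append, List.nodup_cons] at h'
  have hpre : k ∉ pre.map Prod.fst := by
    intro hm; have := h'.2.2 k hm; simp at this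
  have hsuf : k ∉ suf.map Prod.fst := h'.2.1.1
  apply PySem.Dict.ext
  rw [PySem.Dict.items_insert_of_contains _ v (by simp [PySem.Dict.contains_mk])]
  show (pre ++ (k, w) :: suf).map (fun p => if (p.1 == k) = true then (k, v) else p) = _
  rw [List.map_append, List.map_cons, pvMapId k v pre hpre, pvMapId k v suf hsuf]
  simp

theorem pvScaleAux (c : Int) : ∀ (suf pre : List (String × Int)),
    ((pre ++ suf).map Prod.fst).Nodup →
    suf.foldl (fun acc kv => acc.insert kv.1 (c * kv.2))
        (PySem.Dict.mk (pre.map (fun kv => (kv.1, c * kv.2)) ++ suf)) =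
      PySem.Dict.mk ((pre ++ suf).map (fun kv => (kv.1, c * kv.2))) := by
  intro suf
  induction suf with
  | nil => intro pre h; simp
  | cons kv suf ih =>
    intro pre h
    rw [List.foldl_cons]
    have hmid : ((pre.map (fun kv => (kv.1, c * kv.2)) ++ (kv.1, kv.2) :: suf).map Prod.fst).Nodup := by
      simpa [List.map_append, Function.comp] using h
    have hins := pvInsertMid (pre.map (fun kv => (kv.1, c * kv.2))) suf kv.1 (c * kv.2) kv.2 hmid
    rw [show ((kv.1, kv.2) : String × Int) = kv from rfl] at hins
    rw [hins]
    have h2 : (((pre ++ [kv]) ++ suf).map Prod.fst).Nodup := by simpa using h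
    have := ih (pre ++ [kv]) h2
    simpa using this

-- A's in-place scaling loop equals B's scaled dict comprehension (keys unique)
theorem pvScale (d : PySem.Dict String Int) (c : Int) (h : d.keys.Nodup) :
    d.items.foldl (fun acc kv => acc.insert kv.1 (c * kv.2)) d =
      PySem.Dict.mk (d.items.map (fun kv => (kv.1, c * kv.2))) := by
  have := pvScaleAux c d.items [] (by simpa [PySem.Dict.keys] using h)
  simpa [pvMkItems] using this

-- prefix-balance bookkeeping shared by the two binary-operator cases
theorem pvBinArith (op : String) (rest st1 st2 : List String) (c1 c2 : Nat)
    (hwop : pvWt op = 1)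
    (hc1pos : 0 < c1) (hc1le : c1 ≤ rest.length) (hdrop1 : st1 = rest.drop c1)
    (hsum1 : 1 + pvSum (rest.take c1) = 0) (hpre1 : ∀ j < c1, 0 < 1 + pvSum (rest.take j))
    (hc2pos : 0 < c2) (hc2le : c2 ≤ st1.length) (hdrop2 : st2 = st1.drop c2)
    (hsum2 : 1 + pvSum (st1.take c2) = 0) (hpre2 : ∀ j < c2, 0 < 1 + pvSum (st1.take j)) :
    ∃ c, 0 < c ∧ c ≤ (op :: rest).length ∧ st2 = (op :: rest).drop c ∧
      1 + pvSum ((op :: rest).take c) = 0 ∧ ∀ j < c, 0 < 1 + pvSum ((op :: rest).take j) := by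
  have hlen1 : st1.length = rest.length - c1 := by rw [hdrop1, List.length_drop]
  refine ⟨(c1 + c2) + 1, by omega, by simp; omega, ?_, ?_, ?_⟩
  · rw [List.drop_succ_cons, hdrop2, hdrop1, List.drop_drop]
  · rw [List.take_succ_cons, pvSum_cons, hwop, pvSum_take_add, ← hdrop1]
    omega
  · intro j hj
    match j with
    | 0 => simp [pvSum]
    | j + 1 =>
      rw [List.take_succ_cons, pvSum_cons, hwop]
      by_cases hjc : j < c1
      · have := hpre1 j hjc
        omega
      · obtain ⟨j2, rfl⟩ : ∃ j2, j = c1 + j2 := ⟨j - c1, by omega⟩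
        rw [pvSum_take_add, ← hdrop1]
        have := hpre2 j2 (by omega)
        omega

-- a successful A call consumes a nonempty balanced prefix (positive before its end)
-- and returns a dict with unique keys
theorem pvAConsume : ∀ (fuel : Nat) (st : List String) (t : String) (st' : List String) (d : PySem.Dict String Int),
    pyResolveA fuel st t = some (st', d) →
    ∃ c, 0 < c ∧ c ≤ st.length ∧ st' = st.drop c ∧ 1 + pvSum (st.take c) = 0 ∧
      (∀ j < c, 0 < 1 + pvSum (st.take j)) ∧ d.keys.Nodup := by
  intro fuel
  induction fuel with
  | zero => intro st t st' d h; simp [pyResolveA] at h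
  | succ fuel ih =>
    intro st t st' d h
    match st with
    | [] => simp [pyResolveA] at h
    | op :: rest =>
      by_cases h1 : op = "~"
      · simp only [pyResolveA, h1, if_pos] at h
        cases hL : pyResolveA fuel rest t with
        | none => rw [hL] at h; simp at h
        | some p =>
          obtain ⟨st1, u⟩ := p
          rw [hL] at h
          simp only [Option.some.injEq, Prod.mk.injEq] at h
          obtain ⟨hst, hd⟩ := h
          obtain ⟨c1, hc1pos, hc1le, hdrop, hsum, hpre, hnd⟩ := ih rest t st1 u hL
          refine ⟨c1 + 1, by omega, by simp; omega, ?_, ?_, ?_, ?_⟩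
          · rw [← hst, List.drop_succ_cons, hdrop]
          · rw [List.take_succ_cons, pvSum_cons, h1, show pvWt "~" = 0 from by simp [pvWt]]
            omega
          · intro j hj
            match j with
            | 0 => simp [pvSum]
            | j + 1 =>
              rw [List.take_succ_cons, pvSum_cons, h1, show pvWt "~" = 0 from by simp [pvWt]]
              have := hpre j (by omega)
              omega
          · rw [← hd]
            exact PySem.Dict.nodup_keys_foldl_insert_key u.items Prod.fst _ u hnd
      · by_cases h2 : op = "&"
        · simp only [pyResolveA, if_neg h1, if_pos h2] at h
          cases hL : pyResolveA fuel rest t with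
          | none => rw [hL] at h; simp at h
          | some p =>
            obtain ⟨st1, u⟩ := p
            rw [hL] at h
            simp only at h
            cases hR : pyResolveA fuel st1 t with
            | none => rw [hR] at h; simp at h
            | some q =>
              obtain ⟨st2, w⟩ := q
              rw [hR] at h
              simp only [Option.some.injEq, Prod.mk.injEq] at h
              obtain ⟨hst, hd⟩ := h
              obtain ⟨c1, hc1pos, hc1le, hdrop1, hsum1, hpre1, hnd1⟩ := ih rest t st1 u hL
              obtain ⟨c2, hc2pos, hc2le, hdrop2, hsum2, hpre2, hnd2⟩ := ih st1 t st2 w hR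
              obtain ⟨c, hcp, hcl, hcd, hcs, hcpre⟩ :=
                pvBinArith op rest st1 st2 c1 c2 (by simp [pvWt, h2])
                  hc1pos hc1le hdrop1 hsum1 hpre1 hc2pos hc2le hdrop2 hsum2 hpre2
              refine ⟨c, hcp, hcl, by rw [← hst]; exact hcd, hcs, hcpre, ?_⟩
              rw [← hd]
              exact PySem.Dict.nodup_keys_foldl_insert_key w.items Prod.fst _ _
                (PySem.Dict.nodup_keys_foldl_insert_key u.items Prod.fst _ u hnd1)
        · by_cases h3 : op ∈ (["|", "^", "~^", "^~"] : List String)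
          · simp only [pyResolveA, if_neg h1, if_neg h2, if_pos h3] at h
            cases hL : pyResolveA fuel rest t with
            | none => rw [hL] at h; simp at h
            | some p =>
              obtain ⟨st1, u⟩ := p
              rw [hL] at h
              simp only at h
              cases hR : pyResolveA fuel st1 t with
              | none => rw [hR] at h; simp at h
              | some q =>
                obtain ⟨st2, w⟩ := q
                rw [hR] at h
                simp only [Option.some.injEq, Prod.mk.injEq] at h
                obtain ⟨hst, hd⟩ := h
                obtain ⟨c1, hc1pos, hc1le, hdrop1, hsum1, hpre1, hnd1⟩ := ih rest t st1 u hL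
                obtain ⟨c2, hc2pos, hc2le, hdrop2, hsum2, hpre2, hnd2⟩ := ih st1 t st2 w hR
                have hwop : pvWt op = 1 := by
                  simp only [List.mem_cons, List.not_mem_nil, or_false] at h3
                  simp [pvWt, h1]
                  tauto
                obtain ⟨c, hcp, hcl, hcd, hcs, hcpre⟩ :=
                  pvBinArith op rest st1 st2 c1 c2 hwop
                    hc1pos hc1le hdrop1 hsum1 hpre1 hc2pos hc2le hdrop2 hsum2 hpre2
                refine ⟨c, hcp, hcl, by rw [← hst]; exact hcd, hcs, hcpre, ?_⟩
                rw [← hd]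
                exact PySem.Dict.nodup_keys_foldl_insert_key w.items Prod.fst _ _
                  (PySem.Dict.nodup_keys_foldl_insert_key u.items Prod.fst _ u hnd1)
          · simp only [pyResolveA, if_neg h1, if_neg h2, if_neg h3, Option.some.injEq,
              Prod.mk.injEq] at h
            obtain ⟨hst, hd⟩ := h
            have hw : pvWt op = -1 := by
              simp only [List.mem_cons, List.not_mem_nil, or_false] at h3
              simp [pvWt, h1]
              tauto
            refine ⟨1, by omega, by simp, by rw [← hst]; rfl, ?_, ?_, ?_⟩
            · rw [List.take_succ_cons, List.take_zero, pvSum_cons, hw]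
              simp [pvSum]
            · intro j hj
              match j with
              | 0 => simp [pvSum]
            · rw [← hd]
              exact PySem.Dict.nodup_keys_ofList _


-- one-step unfoldings of the work-stack loop
theorem loopB_leaf (tok : String) (rest frames t)
    (h : ¬(tok = "~" ∨ tok = "&" ∨ tok ∈ (["|", "^", "~^", "^~"] : List String))) :
    loopB (tok :: rest) frames none t = loopB rest frames (some (PySem.Dict.ofList [(tok, 1)])) t := by
  rw [loopB]; simp; intro hc; exact absurd (by simpa using hc) h

theorem loopB_push (tok : String) (rest frames t)
    (h : tok = "~" ∨ tok = "&" ∨ tok ∈ (["|", "^", "~^", "^~"] : List String)) :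
    loopB (tok :: rest) frames none t = loopB rest ((tok, none) :: frames) none t := by
  rw [loopB]; simp; intro h1 h2 h3 h4 h5 h6; simp [h1, h2, h3, h4, h5, h6] at h

theorem loopB_done (st : List String) (res t) : loopB st [] (some res) t = some (st, res) := by
  rw [loopB]

theorem loopB_not (st : List String) (frames : List (String × Option (PySem.Dict String Int)))
    (left? res t) :
    loopB st (("~", left?) :: frames) (some res) t =
      loopB st frames (some (PySem.Dict.mk (res.items.map (fun kv => (kv.1, -kv.2))))) t := by
  rw [loopB]; simp

theorem loopB_left (st : List String) (frames : List (String × Option (PySem.Dict String Int)))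
    (op : String) (res t) (h : ¬ op = "~") :
    loopB st ((op, none) :: frames) (some res) t =
      loopB st ((op, some (PySem.Dict.mk (res.items.map (fun kv =>
        (kv.1, (if op ∈ (["|", "^", "~^", "^~"] : List String) ∧ res.contains t = true then 1 else -1) * kv.2))))) :: frames) none t := by
  rw [loopB]; simp [h]

theorem loopB_merge (st : List String) (frames : List (String × Option (PySem.Dict String Int)))
    (op : String) (left res t) (h : ¬ op = "~") :
    loopB st ((op, some left) :: frames) (some res) t =
      loopB st frames (some (res.items.foldl (fun d kv =>
        d.insert kv.1 ((if op ∈ (["|", "^", "~^", "^~"] : List String) ∧ res.contains t = true then 1 else -1) * kv.2)) left)) t := by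
  rw [loopB]; simp [h]

theorem pvWt_ge (s : String) : -1 ≤ pvWt s := by
  unfold pvWt; split_ifs <;> omega

theorem pvSum_take_succ_ge (l : List String) (j : Nat) :
    pvSum (l.take j) - 1 ≤ pvSum (l.take (j + 1)) := by
  rw [List.take_add_one]
  unfold pvSum
  rw [List.map_append, List.sum_append]
  have : -1 ≤ (l[j]?.toList.map pvWt).sum := by
    cases l[j]? with
    | none => simp
    | some s => simpa using pvWt_ge s
  omega

-- discrete intermediate-value fact: a prefix sum that goes nonpositive passes through 0
theorem pvHit (l : List String) : ∀ (j : Nat), 1 + pvSum (l.take j) ≤ 0 →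
    ∃ i ≤ j, 1 + pvSum (l.take i) = 0 := by
  intro j
  induction j with
  | zero => intro h; simp [pvSum] at h
  | succ j ih =>
    intro h
    by_cases h0 : 1 + pvSum (l.take j) ≤ 0
    · obtain ⟨i, hi, he⟩ := ih h0
      exact ⟨i, by omega, he⟩
    · have := pvSum_take_succ_ge l j
      exact ⟨j + 1, le_refl _, by omega⟩

-- the balance precondition guarantees A succeeds
theorem pvASuccess : ∀ (n : Nat) (st : List String) (t : String) (f : Nat),
    st.length ≤ n → st.length < f → (∃ j ≤ st.length, 1 + pvSum (st.take j) = 0) →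
    (pyResolveA f st t).isSome := by
  intro n
  induction n with
  | zero =>
    intro st t f hn hf hex
    obtain ⟨j, hj, hsum⟩ := hex
    have : j = 0 := by omega
    subst this
    simp [pvSum] at hsum
  | succ n ihn =>
    intro st t f hn hf hex
    obtain ⟨j, hj, hsum⟩ := hex
    match st with
    | [] =>
      simp only [List.length_nil, Nat.le_zero] at hj
      subst hj
      simp [pvSum] at hsum
    | op :: rest =>
      obtain ⟨f', rfl⟩ : ∃ f', f = f' + 1 := ⟨f - 1, by omega⟩
      simp only [List.length_cons] at hn hf
      by_cases h1 : op = "~"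
      · obtain ⟨j', rfl⟩ : ∃ j', j = j' + 1 := by
          match j with
          | 0 => simp [pvSum] at hsum
          | j' + 1 => exact ⟨j', rfl⟩
        rw [List.take_succ_cons, pvSum_cons, h1, show pvWt "~" = 0 from by simp [pvWt]] at hsum
        have hrec := ihn rest t f' (by omega) (by omega) ⟨j', by simpa using hj, by omega⟩
        cases hL : pyResolveA f' rest t with
        | none => rw [hL] at hrec; simp at hrec
        | some p =>
          obtain ⟨st1, u⟩ := p
          simp only [pyResolveA, if_pos h1, hL]
          simp
      · have hj' : j ≤ rest.length + 1 := by simpa using hj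
        have key : pvWt op = 1 → ∃ st1 u st2 w, pyResolveA f' rest t = some (st1, u) ∧
            pyResolveA f' st1 t = some (st2, w) := by
          intro hwop
          obtain ⟨j', rfl⟩ : ∃ j', j = j' + 1 := by
            match j with
            | 0 => simp [pvSum] at hsum
            | j' + 1 => exact ⟨j', rfl⟩
          rw [List.take_succ_cons, pvSum_cons, hwop] at hsum
          have hj'' : j' ≤ rest.length := by omega
          obtain ⟨i, hile, hieq⟩ := pvHit rest j' (by omega)
          have hrecL := ihn rest t f' (by omega) (by omega) ⟨i, by omega, hieq⟩
          cases hL : pyResolveA f' rest t with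
          | none => rw [hL] at hrecL; simp at hrecL
          | some p =>
            obtain ⟨st1, u⟩ := p
            obtain ⟨c1, hc1pos, hc1le, hdrop1, hsum1, hpre1, hnd1⟩ := pvAConsume f' rest t st1 u hL
            have hc1i : c1 ≤ i := by
              by_contra hc
              have := hpre1 i (by omega)
              omega
            have hlen1 : st1.length = rest.length - c1 := by rw [hdrop1, List.length_drop]
            have hsum2 : 1 + pvSum (st1.take (j' - c1)) = 0 := by
              have hadd := pvSum_take_add rest c1 (j' - c1)
              rw [← hdrop1, show c1 + (j' - c1) = j' from by omega] at hadd
              omega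
            have hrecR := ihn st1 t f' (by omega) (by omega) ⟨j' - c1, by omega, hsum2⟩
            cases hR : pyResolveA f' st1 t with
            | none => rw [hR] at hrecR; simp at hrecR
            | some q => exact ⟨st1, u, q.1, q.2, rfl, by rw [← hR]⟩
        by_cases h2 : op = "&"
        · obtain ⟨st1, u, st2, w, hL, hR⟩ := key (by simp [pvWt, h2])
          simp [pyResolveA, h2, hL, hR]
        · by_cases h3 : op ∈ (["|", "^", "~^", "^~"] : List String)
          · obtain ⟨st1, u, st2, w, hL, hR⟩ := key (by
              simp only [List.mem_cons, List.not_mem_nil, or_false] at h3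
              simp [pvWt, h1]
              tauto)
            simp [pyResolveA, h1, h2, h3, hL, hR]
          · simp [pyResolveA, h1, h2, h3]

-- the work-stack loop simulates A's recursion: resolving one expression then continuing
theorem pvBisim : ∀ (fuel : Nat) (st : List String) (t : String) (st' : List String)
    (d : PySem.Dict String Int), pyResolveA fuel st t = some (st', d) →
    ∀ frames, loopB st frames none t = loopB st' frames (some d) t := by
  intro fuel
  induction fuel with
  | zero => intro st t st' d h; simp [pyResolveA] at h
  | succ fuel ih =>
    intro st t st' d h frames
    match st with
    | [] => simp [pyResolveA] at h
    | op :: rest =>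
      by_cases h1 : op = "~"
      · subst h1
        simp only [pyResolveA, if_pos] at h
        cases hL : pyResolveA fuel rest t with
        | none => rw [hL] at h; simp at h
        | some p =>
          obtain ⟨st1, u⟩ := p
          rw [hL] at h
          simp only [Option.some.injEq, Prod.mk.injEq] at h
          obtain ⟨hst, hd⟩ := h
          obtain ⟨_, _, _, _, _, _, hnd⟩ := pvAConsume fuel rest t st1 u hL
          rw [loopB_push "~" rest frames t (Or.inl rfl), ih rest t st1 u hL, loopB_not]
          subst hst
          have hdict : d = PySem.Dict.mk (u.items.map fun kv => (kv.1, -kv.2)) := by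
            rw [← hd]
            simp only [show (if (-1 : Int) = 0 ∧ u.contains t = true then (1 : Int) else -1) = -1
              from by norm_num]
            rw [pvScale u (-1) hnd]
            simp
          rw [hdict]
      · by_cases h2 : op = "&"
        · subst h2
          simp only [pyResolveA, if_neg h1, if_pos] at h
          cases hL : pyResolveA fuel rest t with
          | none => rw [hL] at h; simp at h
          | some p =>
            obtain ⟨st1, u⟩ := p
            rw [hL] at h
            simp only at h
            cases hR : pyResolveA fuel st1 t with
            | none => rw [hR] at h; simp at h
            | some q =>
              obtain ⟨st2, w⟩ := q
              rw [hR] at h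
              simp only [Option.some.injEq, Prod.mk.injEq] at h
              obtain ⟨hst, hd⟩ := h
              obtain ⟨_, _, _, _, _, _, hndu⟩ := pvAConsume fuel rest t st1 u hL
              rw [loopB_push "&" rest frames t (Or.inr (Or.inl rfl)), ih rest t st1 u hL,
                loopB_left st1 frames "&" u t (by decide),
                ih st1 t st2 w hR,
                loopB_merge st2 frames "&" _ w t (by decide)]
              subst hst
              have hmem : ("&" : String) ∉ (["|", "^", "~^", "^~"] : List String) := by decide
              have hs1 : (if "&" ∈ (["|", "^", "~^", "^~"] : List String) ∧ u.contains t = true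
                  then (1 : Int) else -1) = -1 := if_neg (fun hc => hmem hc.1)
              have hs2 : (if "&" ∈ (["|", "^", "~^", "^~"] : List String) ∧ w.contains t = true
                  then (1 : Int) else -1) = -1 := if_neg (fun hc => hmem hc.1)
              have ha1 : (if (1 : Int) = 0 ∧ u.contains t = true then (1 : Int) else -1) = -1 := by
                norm_num
              have ha2 : (if (1 : Int) = 0 ∧ w.contains t = true then (1 : Int) else -1) = -1 := by
                norm_num
              rw [← hd]
              simp only [hs1, hs2, ha1, ha2]
              rw [pvScale u (-1) hndu]
        · by_cases h3 : op ∈ (["|", "^", "~^", "^~"] : List String)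
          · simp only [pyResolveA, if_neg h1, if_neg h2, if_pos h3] at h
            cases hL : pyResolveA fuel rest t with
            | none => rw [hL] at h; simp at h
            | some p =>
              obtain ⟨st1, u⟩ := p
              rw [hL] at h
              simp only at h
              cases hR : pyResolveA fuel st1 t with
              | none => rw [hR] at h; simp at h
              | some q =>
                obtain ⟨st2, w⟩ := q
                rw [hR] at h
                simp only [Option.some.injEq, Prod.mk.injEq] at h
                obtain ⟨hst, hd⟩ := h
                obtain ⟨_, _, _, _, _, _, hndu⟩ := pvAConsume fuel rest t st1 u hL
                rw [loopB_push op rest frames t (Or.inr (Or.inr h3)), ih rest t st1 u hL,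
                  loopB_left st1 frames op u t h1,
                  ih st1 t st2 w hR,
                  loopB_merge st2 frames op _ w t h1]
                subst hst
                have hs1 : (if op ∈ (["|", "^", "~^", "^~"] : List String) ∧ u.contains t = true
                    then (1 : Int) else -1) = if u.contains t = true then (1 : Int) else -1 := by
                  simp [h3]
                have hs2 : (if op ∈ (["|", "^", "~^", "^~"] : List String) ∧ w.contains t = true
                    then (1 : Int) else -1) = if w.contains t = true then (1 : Int) else -1 := by
                  simp [h3]
                rw [← hd]
                simp only [hs1, hs2, true_and]
                rw [pvScale u _ hndu]
          · simp only [pyResolveA, if_neg h1, if_neg h2, if_neg h3, Option.some.injEq,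
              Prod.mk.injEq] at h
            obtain ⟨hst, hd⟩ := h
            rw [loopB_leaf op rest frames t (by tauto), hst, hd]

-- ===== VERDICT (by name: the statement is the Claim_ definition above) =====
theorem resolve_unates_py_spec : Claim_equal_resolve_unates_py := by
  intro st t _ hpre
  unfold Pre_resolve_unates_py at hpre
  unfold Spec_resolve_unates_py
  obtain ⟨j, hj, hsum⟩ := hpre
  have hsome := pvASuccess st.length st t (st.length + 1) (le_refl _) (by omega)
    ⟨j, by omega, by simpa [pvSum] using hsum⟩
  cases hA : pyResolveA (st.length + 1) st t with
  | none => rw [hA] at hsome; simp at hsome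
  | some p =>
    obtain ⟨st', d⟩ := p
    unfold resolve_unates_py resolve_unates_py_alt
    rw [hA, pvBisim (st.length + 1) st t st' d hA [], loopB_done]
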